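-- pv_equiv track=rewrite | github.com/vinegm/Sorter-Tester | shellsort.py | gapInsertionSort_counting
-- ===== SOURCE A (Python) =====
-- def gapInsertionSort_counting(alist,start,gap):
--   comparisons = 0
--   swaps = 0
--   for i in range(start+gap,len(alist),gap):
--
--     currentvalue = alist[i]
--     position = i
--
--     while position>=gap and alist[position-gap]>currentvalue:
--       comparisons += 1
--       alist[position]=alist[position-gap]
--       position = position-gap
--       swaps += 1
--
--     alist[position]=currentvalue
--     swaps += 1
--
--   return comparisons, swaps
-- ===== SOURCE B (Python) =====
-- def gapInsertionSort_counting(alist, start, gap):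
--     comparisons = 0
--     swaps = 0
--     if gap > 0:
--         r = (start + gap) % gap
--         k0 = (start + gap - r) // gap
--         sub = alist[r::gap]
--         prefix = sub[:k0]
--         for cur in sub[k0:]:
--             i = len(prefix)
--             while i > 0 and prefix[i - 1] > cur:
--                 i -= 1
--             shifted = len(prefix) - i
--             comparisons += shifted
--             swaps += shifted + 1
--             prefix = prefix[:i] + [cur] + prefix[i:]
--         alist[r::gap] = prefix
--     return comparisons, swaps
-- ===== Notes on version B (the rewrite author's own statement) =====
-- stated objective: alternative
-- what changed: Replaces A's single interleaved strided pass (in-place shifts at positions i, i-gap, ... inside the full array) by a gather/sort/scatter decomposition: B extracts the stride chain alist[r::gap] (r = (start+gap) % gap) as a contiguous list, runs a contiguous insertion sort on it starting at the chain position of start+gap (computing each pass's shift count arithmetically and rebuilding the prefix by slicing instead of shifting elements one by one), and writes the chain back with one slice assignment; …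
-- outside the precondition, e.g. on gapInsertionSort_counting([5, 1], -3, 1): A returns (1, 5), B returns (1, 3)
import Mathlib
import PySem

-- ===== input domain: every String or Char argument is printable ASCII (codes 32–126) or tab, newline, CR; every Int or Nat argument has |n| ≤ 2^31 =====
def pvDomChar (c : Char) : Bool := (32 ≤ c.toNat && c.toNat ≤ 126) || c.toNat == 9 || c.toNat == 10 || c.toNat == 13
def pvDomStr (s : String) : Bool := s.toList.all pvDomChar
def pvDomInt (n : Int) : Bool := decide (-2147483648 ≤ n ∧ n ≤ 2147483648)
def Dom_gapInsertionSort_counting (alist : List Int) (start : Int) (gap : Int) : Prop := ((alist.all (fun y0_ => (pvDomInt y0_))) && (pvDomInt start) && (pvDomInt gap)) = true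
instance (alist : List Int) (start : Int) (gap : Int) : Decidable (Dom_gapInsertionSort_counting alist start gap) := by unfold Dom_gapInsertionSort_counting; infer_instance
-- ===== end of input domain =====

-- B replaces A's interleaved strided in-place pass by a gather / insertion-sort / scatter decomposition
-- (alternative decomposition, same asymptotic cost). Both Pythons mutate `alist` identically inside Pre_;
-- the equivalence proved here is about the RETURN value (the two counters) only.

-- ===== PORT A =====
-- A's inner `while`: fuel bounds the iteration count (inside Pre_ the loop decreases
-- `position` by `gap ≥ 1` each step, so the fuel passed at the call site is never exhausted).
def pvAWhile : Nat → List Int → Int → Int → Int → Int → Int → List Int × Int × Int × Int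
  | 0, a, position, _, _, c, w => (a, position, c, w)
  | fuel+1, a, position, gap, cur, c, w =>
    if position ≥ gap ∧ PySem.List.pyGetD a (position - gap) 0 > cur then
      pvAWhile fuel (PySem.List.pySetD a position (PySem.List.pyGetD a (position - gap) 0))
        (position - gap) gap cur (c+1) (w+1)
    else (a, position, c, w)

def gapInsertionSort_counting (alist : List Int) (start : Int) (gap : Int) : Int × Int :=
  let res := (PySem.List.pyRange (start+gap) (alist.length) gap).foldl
    (fun st i =>
      let currentvalue := PySem.List.pyGetD st.1 i 0
      let t := pvAWhile (i.toNat + 1) st.1 i gap currentvalue st.2.1 st.2.2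
      (PySem.List.pySetD t.1 t.2.1 currentvalue, t.2.2.1, t.2.2.2 + 1))
    (alist, 0, 0)
  (res.2.1, res.2.2)

-- ===== PORT B =====
-- B's helper `_insert_point`: walk i down while prefix[i-1] > cur.
def pvInsertPoint (pre : List Int) (cur : Int) : Nat → Nat
  | 0 => 0
  | i+1 => if PySem.List.pyGetD pre (i : Int) 0 > cur then pvInsertPoint pre cur i else i+1

-- B's final slice assignment `alist[r::gap] = prefix` only mutates the caller's list and does not
-- touch the returned counters, so it has no counterpart in this pure port.
def gapInsertionSort_counting_alt (alist : List Int) (start : Int) (gap : Int) : Int × Int :=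
  if 0 < gap then
    let r := PySem.Int.mod (start + gap) gap
    let k0 := PySem.Int.floordiv (start + gap - r) gap
    let sub := (PySem.List.slice? alist (some r) none gap).getD []
    let res := (PySem.List.slice sub (some k0) none).foldl
      (fun st cur =>
        let i := pvInsertPoint st.1 cur st.1.length
        let shifted : Int := (st.1.length : Int) - (i : Int)
        (PySem.List.slice st.1 none (some (i:Int)) ++ [cur] ++ PySem.List.slice st.1 (some (i:Int)) none,
         st.2.1 + shifted, st.2.2 + shifted + 1))
      (PySem.List.slice sub none (some k0), 0, 0)
    (res.2.1, res.2.2)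
  else (0, 0)

-- ===== PRECONDITION & SPEC =====
-- Pre_ excludes inputs where A raises (gap = 0: ValueError from range; gap < 0 with start+gap > len:
-- IndexError; gap > 0 with start+gap < -len: IndexError) and additionally the inputs with gap > 0 and
-- -len ≤ start+gap < 0, on which A still returns but its value arises from accidental negative-index
-- wraparound of `alist[i]` — a quirk of A's implementation that B does not reproduce.
def Pre_gapInsertionSort_counting (alist : List Int) (start : Int) (gap : Int) : Prop :=
  gap ≠ 0 ∧ (0 < gap → 0 ≤ start + gap) ∧ (gap < 0 → start + gap ≤ (alist.length : Int))
instance (alist : List Int) (start : Int) (gap : Int) : Decidable (Pre_gapInsertionSort_counting alist start gap) := by unfold Pre_gapInsertionSort_counting; infer_instance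

def pvWitness_gapInsertionSort_counting : List Int × Int × Int := ([3, 1, 2], 0, 1)

def Spec_gapInsertionSort_counting (alist : List Int) (start : Int) (gap : Int) (out : Int × Int) : Prop := out = gapInsertionSort_counting_alt alist start gap
instance (alist : List Int) (start : Int) (gap : Int) (out : Int × Int) : Decidable (Spec_gapInsertionSort_counting alist start gap out) := by unfold Spec_gapInsertionSort_counting; infer_instance

-- ===== CLAIM (what is proved, stated in full; the proofs are below) =====
def Claim_equal_gapInsertionSort_counting : Prop := ∀ (alist : List Int) (start : Int) (gap : Int), Dom_gapInsertionSort_counting alist start gap → Pre_gapInsertionSort_counting alist start gap → Spec_gapInsertionSort_counting alist start gap (gapInsertionSort_counting alist start gap)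

-- ===== LEMMAS AND PROOFS =====

-- The loop bodies of the two ports, named so the lockstep lemma below can speak about them.
def pvAStep (gap : Int) : (List Int × Int × Int) → Int → (List Int × Int × Int) :=
  fun st i =>
    let currentvalue := PySem.List.pyGetD st.1 i 0
    let t := pvAWhile (i.toNat + 1) st.1 i gap currentvalue st.2.1 st.2.2
    (PySem.List.pySetD t.1 t.2.1 currentvalue, t.2.2.1, t.2.2.2 + 1)

def pvBStep : (List Int × Int × Int) → Int → (List Int × Int × Int) :=
  fun st cur =>
    let i := pvInsertPoint st.1 cur st.1.length
    let shifted : Int := (st.1.length : Int) - (i : Int)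
    (PySem.List.slice st.1 none (some (i:Int)) ++ [cur] ++ PySem.List.slice st.1 (some (i:Int)) none,
     st.2.1 + shifted, st.2.2 + shifted + 1)

theorem portA_eq (alist : List Int) (start gap : Int) :
    gapInsertionSort_counting alist start gap =
      (((PySem.List.pyRange (start+gap) (alist.length) gap).foldl (pvAStep gap) (alist, 0, 0)).2.1,
       ((PySem.List.pyRange (start+gap) (alist.length) gap).foldl (pvAStep gap) (alist, 0, 0)).2.2) := rfl

theorem portB_eq (alist : List Int) (start gap : Int) (h : 0 < gap) :
    gapInsertionSort_counting_alt alist start gap =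
      ((((PySem.List.slice ((PySem.List.slice? alist (some (PySem.Int.mod (start+gap) gap)) none gap).getD [])
            (some (PySem.Int.floordiv (start + gap - PySem.Int.mod (start+gap) gap) gap)) none).foldl pvBStep
          (PySem.List.slice ((PySem.List.slice? alist (some (PySem.Int.mod (start+gap) gap)) none gap).getD [])
            none (some (PySem.Int.floordiv (start + gap - PySem.Int.mod (start+gap) gap) gap)), 0, 0)).2.1),
       (((PySem.List.slice ((PySem.List.slice? alist (some (PySem.Int.mod (start+gap) gap)) none gap).getD [])
            (some (PySem.Int.floordiv (start + gap - PySem.Int.mod (start+gap) gap) gap)) none).foldl pvBStep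
          (PySem.List.slice ((PySem.List.slice? alist (some (PySem.Int.mod (start+gap) gap)) none gap).getD [])
            none (some (PySem.Int.floordiv (start + gap - PySem.Int.mod (start+gap) gap) gap)), 0, 0)).2.2)) := by
  unfold gapInsertionSort_counting_alt
  rw [if_pos h]
  rfl

-- Unfolding equations (definitional).
theorem pvAWhile_succ_eq (fuel : Nat) (a : List Int) (position gap cur c w : Int) :
    pvAWhile (fuel+1) a position gap cur c w =
      if position ≥ gap ∧ PySem.List.pyGetD a (position - gap) 0 > cur then
        pvAWhile fuel (PySem.List.pySetD a position (PySem.List.pyGetD a (position - gap) 0))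
          (position - gap) gap cur (c+1) (w+1)
      else (a, position, c, w) := rfl

theorem pvInsertPoint_succ_eq (l : List Int) (cur : Int) (i : Nat) :
    pvInsertPoint l cur (i+1) =
      if PySem.List.pyGetD l (i : Int) 0 > cur then pvInsertPoint l cur i else i+1 := rfl

-- The stride chain of array `a`: values at indices r, r+gap, …, L entries.
def pvG (a : List Int) (r gap : Int) (L : Nat) : List Int :=
  (List.range L).map (fun (k : Nat) => PySem.List.pyGetD a (r + gap * (k:Int)) 0)

-- Number of chain indices below n.
def pvL (r n gap : Int) : Nat := if r < n then ((n - r + gap - 1) / gap).toNat else 0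

theorem pvG_length (a : List Int) (r gap : Int) (L : Nat) : (pvG a r gap L).length = L := by
  simp [pvG]

theorem pvG_getElem? (a : List Int) (r gap : Int) (L : Nat) (k : Nat) (hk : k < L) :
    (pvG a r gap L)[k]? = some (PySem.List.pyGetD a (r + gap * (k:Int)) 0) := by
  rw [pvG, List.getElem?_map, List.getElem?_range hk]
  rfl

theorem pvG_getD (a : List Int) (r gap : Int) (L : Nat) (k : Nat) (hk : k < L) :
    (pvG a r gap L).getD k 0 = PySem.List.pyGetD a (r + gap * (k:Int)) 0 := by
  rw [List.getD_eq_getElem?_getD, pvG_getElem? a r gap L k hk]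
  rfl

theorem pvL_iff (r n gap : Int) (hg : 0 < gap) (hr0 : 0 ≤ r) (k : Nat) :
    k < pvL r n gap ↔ r + gap * (k:Int) < n := by
  unfold pvL
  by_cases hrn : r < n
  · rw [if_pos hrn]
    have hk0 : (0:Int) ≤ (k:Int) := Int.natCast_nonneg k
    constructor
    · intro hk
      have h1 : (k:Int) + 1 ≤ (n - r + gap - 1) / gap := by
        generalize hq : (n - r + gap - 1) / gap = q at hk ⊢
        omega
      have h2 := (Int.le_ediv_iff_mul_le hg).mp h1
      have e : ((k:Int) + 1) * gap = gap * (k:Int) + gap := by ring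
      rw [e] at h2
      linarith
    · intro hk
      have h1 : ((k:Int) + 1) * gap ≤ n - r + gap - 1 := by
        have e : ((k:Int) + 1) * gap = gap * (k:Int) + gap := by ring
        rw [e]; linarith
      have h2 := (Int.le_ediv_iff_mul_le hg).mpr h1
      generalize hq : (n - r + gap - 1) / gap = q at h2 ⊢
      omega
  · rw [if_neg hrn]
    have h0 : (0:Int) ≤ gap * (k:Int) := mul_nonneg hg.le (Int.natCast_nonneg k)
    push_neg at hrn
    constructor
    · intro h; omega
    · intro h; exfalso; linarith

theorem pyRange_pos_nil (a b gap : Int) (hg : 0 < gap) (h : b ≤ a) :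
    PySem.List.pyRange a b gap = [] := by
  rw [PySem.List.pyRange_of_pos _ _ hg, if_neg (not_lt.mpr h)]
  simp

theorem pyRange_pos_cons (a b gap : Int) (hg : 0 < gap) (h : a < b) :
    PySem.List.pyRange a b gap = a :: PySem.List.pyRange (a + gap) b gap := by
  rw [PySem.List.pyRange_of_pos _ _ hg, PySem.List.pyRange_of_pos _ _ hg, if_pos h]
  have key : ((b - a + gap - 1) / gap).toNat
      = (if a + gap < b then ((b - (a + gap) + gap - 1) / gap).toNat else 0) + 1 := by
    have e1 : b - a + gap - 1 = (b - a - 1) + 1 * gap := by ring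
    rw [e1, Int.add_mul_ediv_right _ _ (ne_of_gt hg)]
    by_cases h2 : a + gap < b
    · rw [if_pos h2]
      have e2 : b - (a + gap) + gap - 1 = b - a - 1 := by ring
      rw [e2]
      have h3 : 0 ≤ (b - a - 1) / gap := Int.ediv_nonneg (by omega) hg.le
      omega
    · rw [if_neg h2]
      have h3 : (b - a - 1) / gap = 0 := Int.ediv_eq_zero_of_lt (by omega) (by omega)
      omega
  rw [key, List.range_succ_eq_map]
  simp only [List.map_cons, List.map_map]
  congr 1
  · simp
  · apply List.map_congr_left
    intro k _
    simp only [Function.comp]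
    push_cast
    ring

theorem pyRange_neg_nil (a b gap : Int) (hg : gap < 0) (h : a ≤ b) :
    PySem.List.pyRange a b gap = [] := by
  unfold PySem.List.pyRange
  rw [if_neg (by omega : ¬ gap = 0)]
  rw [if_neg (by omega : ¬ (0:Int) < gap), if_neg (by omega : ¬ b < a)]
  simp

-- B's gather alist[r::gap] is the chain list.
theorem slice_step_eq_pvG (a : List Int) (r gap : Int) (hg : 0 < gap) (hr0 : 0 ≤ r) :
    (PySem.List.slice? a (some r) none gap).getD [] = pvG a r gap (pvL r (a.length : Int) gap) := by
  unfold PySem.List.slice? PySem.List.sliceIndices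
  rw [if_neg (ne_of_gt hg)]
  simp only [not_lt.mpr hg.le, if_false, not_lt.mpr hr0, Option.getD_some]
  by_cases hrn : r < (a.length : Int)
  · have hmin : min r (a.length : Int) = r := min_eq_left hrn.le
    rw [hmin, if_pos hg, if_pos hrn]
    unfold pvL
    rw [if_pos hrn]
    have hcongr : ∀ k ∈ List.range (((a.length : Int) - r + gap - 1) / gap).toNat,
        a[(r + gap * (k:Int)).toNat]? = some (PySem.List.pyGetD a (r + gap * (k:Int)) 0) := by
      intro k hk
      rw [List.mem_range] at hk
      have hlt : r + gap * (k:Int) < (a.length : Int) :=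
        (pvL_iff r (a.length : Int) gap hg hr0 k).mp (by unfold pvL; rw [if_pos hrn]; exact hk)
      have hge : (0:Int) ≤ r + gap * (k:Int) :=
        add_nonneg hr0 (mul_nonneg hg.le (Int.natCast_nonneg k))
      have hlt' : (r + gap * (k:Int)).toNat < a.length := by omega
      rw [List.getElem?_eq_getElem hlt']
      rw [PySem.List.pyGetD_eq_getElem a 0 hge hlt]
    rw [List.filterMap_congr hcongr]
    have e : (fun (k : Nat) => some (PySem.List.pyGetD a (r + gap * (k:Int)) 0))
        = some ∘ (fun (k : Nat) => PySem.List.pyGetD a (r + gap * (k:Int)) 0) := rfl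
    rw [pvG, e, List.filterMap_eq_map]
  · have hmin : min r (a.length : Int) = (a.length : Int) := min_eq_right (not_lt.mp hrn)
    rw [hmin, if_pos hg, if_neg (lt_irrefl _)]
    unfold pvL
    rw [if_neg hrn]
    simp [pvG]

-- Writing at chain index t is a `set` on the chain list.
theorem pvG_pySetD (a : List Int) (r gap : Int) (L : Nat) (t : Nat) (v : Int)
    (hg : 0 < gap) (hr0 : 0 ≤ r)
    (hL : ∀ k : Nat, k < L → r + gap * (k:Int) < (a.length : Int)) (ht : t < L) :
    pvG (PySem.List.pySetD a (r + gap * (t:Int)) v) r gap L = (pvG a r gap L).set t v := by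
  have hcast : ∀ m : Nat, (0:Int) ≤ r + gap * (m:Int) :=
    fun m => add_nonneg hr0 (mul_nonneg hg.le (Int.natCast_nonneg m))
  have hinj : ∀ m k : Nat, (r + gap * (m:Int)).toNat = (r + gap * (k:Int)).toNat → m = k := by
    intro m k h
    have h1 := hcast m
    have h2 := hcast k
    have h' : gap * (m:Int) = gap * (k:Int) := by omega
    have h'' : (m:Int) = (k:Int) := mul_left_cancel₀ (ne_of_gt hg) h'
    exact_mod_cast h''
  rw [PySem.List.pySetD_of_nonneg a v (hcast t)]
  apply List.ext_getElem?
  intro k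
  rw [List.getElem?_set]
  by_cases hk : k < L
  · have hkn : r + gap * (k:Int) < (a.length : Int) := hL k hk
    have htn : r + gap * (t:Int) < (a.length : Int) := hL t ht
    have hkN : (r + gap * (k:Int)).toNat < a.length := by have := hcast k; omega
    have htN : (r + gap * (t:Int)).toNat < a.length := by have := hcast t; omega
    rw [pvG_getElem? _ _ _ _ _ hk, pvG_getElem? _ _ _ _ _ hk]
    have hkn' : r + gap * (k:Int) < (((a.set (r + gap * (t:Int)).toNat v).length : Nat) : Int) := by
      rw [List.length_set]; exact hkn
    have e1 := PySem.List.pyGetD_eq_getElem (a.set (r + gap * (t:Int)).toNat v) 0 (hcast k) hkn'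
    have e2 := PySem.List.pyGetD_eq_getElem a 0 (hcast k) hkn
    rw [e1, e2, List.getElem_set]
    by_cases htk : t = k
    · subst htk
      simp [pvG_length, ht]
    · rw [if_neg htk, if_neg (fun hc => htk (hinj t k hc))]
  · have h1 : (pvG (a.set (r + gap * (t:Int)).toNat v) r gap L)[k]? = none :=
      List.getElem?_eq_none (by rw [pvG_length]; omega)
    have h2 : (pvG a r gap L)[k]? = none :=
      List.getElem?_eq_none (by rw [pvG_length]; omega)
    rw [h1, h2, if_neg (by omega : ¬ t = k)]

theorem pvInsertPoint_le (l : List Int) (cur : Int) (i : Nat) : pvInsertPoint l cur i ≤ i := by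
  induction i with
  | zero => exact le_refl _
  | succ i ih =>
    rw [pvInsertPoint_succ_eq]
    split
    · exact le_trans ih (Nat.le_succ i)
    · exact le_refl _

theorem pvInsertPoint_ext (l l' : List Int) (cur : Int) (i : Nat)
    (h : ∀ u : Nat, u < i → l.getD u 0 = l'.getD u 0) :
    pvInsertPoint l cur i = pvInsertPoint l' cur i := by
  induction i with
  | zero => rfl
  | succ i ih =>
    rw [pvInsertPoint_succ_eq, pvInsertPoint_succ_eq]
    rw [PySem.List.pyGetD_natCast, PySem.List.pyGetD_natCast, h i (Nat.lt_succ_self i)]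
    split
    · exact ih (fun u hu => h u (Nat.lt_succ_of_lt hu))
    · rfl

theorem pvInsertPoint_succ_of_gt (l : List Int) (cur : Int) (i : Nat)
    (h : l.getD i 0 > cur) : pvInsertPoint l cur (i+1) = pvInsertPoint l cur i := by
  rw [pvInsertPoint_succ_eq, PySem.List.pyGetD_natCast, if_pos h]

theorem pvInsertPoint_succ_of_le (l : List Int) (cur : Int) (i : Nat)
    (h : ¬ l.getD i 0 > cur) : pvInsertPoint l cur (i+1) = i + 1 := by
  rw [pvInsertPoint_succ_eq, PySem.List.pyGetD_natCast, if_neg h]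

-- The chain list after one full pass of A at chain index T (shift + final placement of cur).
def pvIns (orig : List Int) (i T : Nat) (cur : Int) : List Int :=
  orig.take i ++ [cur] ++ (orig.drop i).take (T - i) ++ orig.drop (T + 1)

theorem pvIns_self (orig : List Int) (T : Nat) (cur : Int) (hT : T < orig.length) :
    pvIns orig T T cur = orig.set T cur := by
  unfold pvIns
  rw [List.set_eq_take_append_cons_drop, if_pos hT]
  simp

theorem pvIns_set (orig : List Int) (i T : Nat) (cur : Int) (hi : i ≤ T) (hT : T + 1 < orig.length) :
    pvIns (orig.set (T+1) (orig.getD T 0)) i T cur = pvIns orig i (T+1) cur := by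
  have hTlen : T < orig.length := by omega
  unfold pvIns
  have htake : (orig.set (T+1) (orig.getD T 0)).take i = orig.take i := by
    apply List.ext_getElem?
    intro k
    simp only [List.getElem?_take, List.getElem?_set]
    by_cases hk : k < i
    · rw [if_pos hk, if_pos hk, if_neg (by omega : ¬ T + 1 = k)]
    · rw [if_neg hk, if_neg hk]
  have hmid : ((orig.set (T+1) (orig.getD T 0)).drop i).take (T - i) = (orig.drop i).take (T - i) := by
    apply List.ext_getElem?
    intro k
    simp only [List.getElem?_take, List.getElem?_drop, List.getElem?_set]
    by_cases hk : k < T - i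
    · rw [if_pos hk, if_pos hk, if_neg (by omega : ¬ T + 1 = i + k)]
    · rw [if_neg hk, if_neg hk]
  have hdrop : (orig.set (T+1) (orig.getD T 0)).drop (T+1)
      = orig.getD T 0 :: orig.drop (T+2) := by
    rw [List.set_eq_take_append_cons_drop, if_pos hT]
    apply List.drop_left'
    rw [List.length_take]
    omega
  have hlast : (orig.drop i).take (T + 1 - i) = (orig.drop i).take (T - i) ++ [orig.getD T 0] := by
    have h1 : T + 1 - i = (T - i) + 1 := by omega
    rw [h1, List.take_add_one]
    have h2 : (orig.drop i)[T - i]? = some (orig.getD T 0) := by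
      rw [List.getElem?_drop]
      have h3 : i + (T - i) = T := by omega
      rw [h3, List.getElem?_eq_getElem hTlen]
      rw [List.getD_eq_getElem?_getD, List.getElem?_eq_getElem hTlen]
      rfl
    rw [h2]
    simp
  rw [htake, hmid, hdrop, hlast]
  simp [List.append_assoc]

theorem pvIns_split (pre rest : List Int) (i T : Nat) (x : Int) (tail : List Int) (cur : Int)
    (hi : i ≤ T) (hT : pre.length = T) (hrest : rest = x :: tail) :
    pvIns (pre ++ rest) i T cur = (pre.take i ++ [cur] ++ pre.drop i) ++ tail := by
  subst hT
  unfold pvIns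
  rw [List.take_append_of_le_length hi]
  rw [List.drop_append_of_le_length hi]
  have h1 : ((pre.drop i) ++ rest).take (pre.length - i) = pre.drop i := by
    apply List.take_left'
    rw [List.length_drop]
  rw [h1]
  have h2 : (pre ++ rest).drop (pre.length + 1) = tail := by
    rw [hrest, List.append_cons]
    apply List.drop_left'
    simp
  rw [h2]

-- One full pass of A (inner while + final placement), in chain coordinates.
theorem pvPass_spec (r gap : Int) (hg : 0 < gap) (hr0 : 0 ≤ r) (hrg : r < gap) (L : Nat) :
    ∀ (T : Nat) (a : List Int) (cur c w : Int) (fuel : Nat),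
    (∀ k : Nat, k < L → r + gap * (k:Int) < (a.length : Int)) → T < L → T < fuel →
    (pvAWhile fuel a (r + gap * (T:Int)) gap cur c w).2.2 =
      (c + ((T:Int) - (pvInsertPoint (pvG a r gap L) cur T : Int)),
       w + ((T:Int) - (pvInsertPoint (pvG a r gap L) cur T : Int))) ∧
    (PySem.List.pySetD (pvAWhile fuel a (r + gap * (T:Int)) gap cur c w).1
        (pvAWhile fuel a (r + gap * (T:Int)) gap cur c w).2.1 cur).length = a.length ∧
    pvG (PySem.List.pySetD (pvAWhile fuel a (r + gap * (T:Int)) gap cur c w).1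
        (pvAWhile fuel a (r + gap * (T:Int)) gap cur c w).2.1 cur) r gap L =
      pvIns (pvG a r gap L) (pvInsertPoint (pvG a r gap L) cur T) T cur := by
  intro T
  induction T with
  | zero =>
    intro a cur c w fuel hL hTL hfuel
    cases fuel with
    | zero => omega
    | succ f =>
      simp only [Nat.cast_zero, mul_zero, add_zero]
      rw [pvAWhile_succ_eq]
      rw [if_neg (fun hcon => absurd hcon.1 (by omega))]
      refine ⟨by simp [pvInsertPoint], ?_, ?_⟩
      · simp [PySem.List.length_pySetD]
      · have hset := pvG_pySetD a r gap L 0 cur hg hr0 hL hTL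
        simp only [Nat.cast_zero, mul_zero, add_zero] at hset
        simp only [pvInsertPoint]
        rw [hset]
        rw [pvIns_self _ _ _ (by rw [pvG_length]; exact hTL)]
  | succ T ih =>
    intro a cur c w fuel hL hTL hfuel
    cases fuel with
    | zero => omega
    | succ f =>
      have hTL' : T < L := by omega
      have hc1 : ((T+1 : Nat) : Int) = (T:Int) + 1 := by push_cast; ring
      have hpos : r + gap * ((T:Int) + 1) - gap = r + gap * (T:Int) := by ring
      have hread : PySem.List.pyGetD a (r + gap * (T:Int)) 0 = (pvG a r gap L).getD T 0 :=
        (pvG_getD a r gap L T hTL').symm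
      have hguard1 : r + gap * ((T:Int) + 1) ≥ gap := by
        have h1 : (0:Int) ≤ gap * (T:Int) := mul_nonneg hg.le (Int.natCast_nonneg T)
        nlinarith
      rw [pvAWhile_succ_eq, hc1, hpos, hread]
      by_cases hcmp : (pvG a r gap L).getD T 0 > cur
      · rw [if_pos ⟨hguard1, hcmp⟩]
        have hsets := pvG_pySetD a r gap L (T+1) ((pvG a r gap L).getD T 0) hg hr0 hL hTL
        rw [hc1] at hsets
        set a' := PySem.List.pySetD a (r + gap * ((T:Int) + 1)) ((pvG a r gap L).getD T 0) with ha'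
        have hlen' : a'.length = a.length := PySem.List.length_pySetD ..
        have hL' : ∀ k : Nat, k < L → r + gap * (k:Int) < (a'.length : Int) := by
          intro k hk; rw [hlen']; exact hL k hk
        have hext : ∀ u : Nat, u < T → (pvG a' r gap L).getD u 0 = (pvG a r gap L).getD u 0 := by
          intro u hu
          rw [hsets, List.getD_eq_getElem?_getD, List.getElem?_set,
            if_neg (by omega : ¬ T + 1 = u), ← List.getD_eq_getElem?_getD]
        have hip : pvInsertPoint (pvG a' r gap L) cur T = pvInsertPoint (pvG a r gap L) cur T :=
          pvInsertPoint_ext _ _ cur T hext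
        have hip1 : pvInsertPoint (pvG a r gap L) cur (T+1) = pvInsertPoint (pvG a r gap L) cur T :=
          pvInsertPoint_succ_of_gt _ _ _ hcmp
        obtain ⟨ihc, ihlen, ihG⟩ := ih a' cur (c+1) (w+1) f hL' hTL' (by omega)
        rw [hip] at ihc ihG
        refine ⟨?_, ?_, ?_⟩
        · rw [ihc, hip1]
          simp only [Prod.mk.injEq]
          constructor <;> (push_cast; ring)
        · rw [ihlen, hlen']
        · rw [ihG, hip1, hsets]
          apply pvIns_set
          · exact pvInsertPoint_le _ _ _
          · rw [pvG_length]; exact hTL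
      · rw [if_neg (fun hcon => hcmp hcon.2)]
        have hip1 : pvInsertPoint (pvG a r gap L) cur (T+1) = T + 1 :=
          pvInsertPoint_succ_of_le _ _ _ hcmp
        have hsets := pvG_pySetD a r gap L (T+1) cur hg hr0 hL hTL
        rw [hc1] at hsets
        refine ⟨?_, ?_, ?_⟩
        · rw [hip1]
          show (c, w) = _
          simp only [Prod.mk.injEq]
          constructor <;> (push_cast; ring)
        · simp [PySem.List.length_pySetD]
        · rw [hsets, hip1]
          rw [pvIns_self _ _ _ (by rw [pvG_length]; exact hTL)]

-- The outer loops in lockstep.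
theorem pvOuter_spec (alist : List Int) (r gap : Int) (hg : 0 < gap) (hr0 : 0 ≤ r) (hrg : r < gap)
    (L : Nat) (sub : List Int) (hsub : sub = pvG alist r gap L)
    (hL : ∀ k : Nat, k < L ↔ r + gap * (k:Int) < (alist.length : Int)) :
    ∀ (m j : Nat) (a pre : List Int) (c w : Int), j + m = L → a.length = alist.length →
    pvG a r gap L = pre ++ sub.drop j → pre.length = j →
    ((PySem.List.pyRange (r + gap * (j:Int)) (alist.length : Int) gap).foldl (pvAStep gap) (a, c, w)).2 =
    ((sub.drop j).foldl pvBStep (pre, c, w)).2 := by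
  have hsublen : sub.length = L := by rw [hsub, pvG_length]
  intro m
  induction m with
  | zero =>
    intro j a pre c w hjm hlen hinv hprelen
    have hj : j = L := by omega
    subst hj
    have h1 : ¬ (r + gap * (j:Int) < (alist.length : Int)) := fun hc => (lt_irrefl j) ((hL j).mpr hc)
    rw [pyRange_pos_nil _ _ _ hg (not_lt.mp h1)]
    rw [List.drop_eq_nil_of_le (by omega)]
    simp
  | succ m ih =>
    intro j a pre c w hjm hlen hinv hprelen
    have hjL : j < L := by omega
    have hjs : j < sub.length := by omega
    have hjn : r + gap * (j:Int) < (alist.length : Int) := (hL j).mp hjL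
    have hgetj : sub.getD j 0 = sub[j]'hjs := by
      rw [List.getD_eq_getElem?_getD, List.getElem?_eq_getElem hjs]
      rfl
    have hsub_j : sub.drop j = sub.getD j 0 :: sub.drop (j+1) := by
      rw [hgetj]
      exact List.drop_eq_getElem_cons hjs
    have hrange : PySem.List.pyRange (r + gap * (j:Int)) (alist.length : Int) gap
        = (r + gap * (j:Int)) ::
          PySem.List.pyRange (r + gap * ((j+1 : Nat):Int)) (alist.length : Int) gap := by
      rw [pyRange_pos_cons _ _ _ hg hjn]
      congr 2
      push_cast
      ring
    have hL' : ∀ k : Nat, k < L → r + gap * (k:Int) < (a.length : Int) := by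
      intro k hk; rw [hlen]; exact (hL k).mp hk
    have hcurv : PySem.List.pyGetD a (r + gap * (j:Int)) 0 = sub.getD j 0 := by
      rw [← pvG_getD a r gap L j hjL, hinv]
      rw [List.getD_eq_getElem?_getD, List.getElem?_append_right (by omega : pre.length ≤ j),
        hprelen, Nat.sub_self]
      rw [hsub_j]
      rfl
    have hfuel : j < (r + gap * (j:Int)).toNat + 1 := by
      have h1 : (j:Int) ≤ gap * (j:Int) :=
        le_mul_of_one_le_left (Int.natCast_nonneg j) (by omega : (1:Int) ≤ gap)
      have h2 : (j:Int) ≤ r + gap * (j:Int) := by linarith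
      generalize hx : r + gap * (j:Int) = x at h2
      omega
    obtain ⟨hpc, hplen, hpG⟩ := pvPass_spec r gap hg hr0 hrg L j a
      (PySem.List.pyGetD a (r + gap * (j:Int)) 0) c w ((r + gap * (j:Int)).toNat + 1) hL' hjL hfuel
    set i := pvInsertPoint (pvG a r gap L) (PySem.List.pyGetD a (r + gap * (j:Int)) 0) j with hidef
    set t := pvAWhile ((r + gap * (j:Int)).toNat + 1) a (r + gap * (j:Int)) gap
      (PySem.List.pyGetD a (r + gap * (j:Int)) 0) c w with htdef
    have hij : i ≤ j := pvInsertPoint_le _ _ _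
    have hstepA : pvAStep gap (a, c, w) (r + gap * (j:Int))
        = (PySem.List.pySetD t.1 t.2.1 (PySem.List.pyGetD a (r + gap * (j:Int)) 0),
           c + ((j:Int) - (i:Int)), w + ((j:Int) - (i:Int)) + 1) := by
      show (PySem.List.pySetD t.1 t.2.1 (PySem.List.pyGetD a (r + gap * (j:Int)) 0),
           t.2.2.1, t.2.2.2 + 1) = _
      rw [hpc]
    have hiB : pvInsertPoint pre (sub.getD j 0) pre.length = i := by
      rw [hidef, hcurv, hprelen]
      apply pvInsertPoint_ext
      intro u hu
      rw [hinv, List.getD_eq_getElem?_getD, List.getD_eq_getElem?_getD,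
        List.getElem?_append_left (by omega : u < pre.length)]
    have hstepB : pvBStep (pre, c, w) (sub.getD j 0)
        = (pre.take i ++ [sub.getD j 0] ++ pre.drop i,
           c + ((j:Int) - (i:Int)), w + ((j:Int) - (i:Int)) + 1) := by
      show (PySem.List.slice pre none (some ((pvInsertPoint pre (sub.getD j 0) pre.length : Nat):Int))
              ++ [sub.getD j 0]
              ++ PySem.List.slice pre (some ((pvInsertPoint pre (sub.getD j 0) pre.length : Nat):Int)) none,
            c + ((pre.length : Int) - ((pvInsertPoint pre (sub.getD j 0) pre.length : Nat):Int)),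
            w + ((pre.length : Int) - ((pvInsertPoint pre (sub.getD j 0) pre.length : Nat):Int)) + 1) = _
      rw [hiB, hprelen]
      rw [PySem.List.slice_to pre (Int.natCast_nonneg i), PySem.List.slice_from pre (Int.natCast_nonneg i)]
      rw [Int.toNat_natCast]
    have hAlen : (PySem.List.pySetD t.1 t.2.1 (PySem.List.pyGetD a (r + gap * (j:Int)) 0)).length
        = alist.length := by rw [hplen, hlen]
    have hGinv : pvG (PySem.List.pySetD t.1 t.2.1 (PySem.List.pyGetD a (r + gap * (j:Int)) 0)) r gap L
        = (pre.take i ++ [sub.getD j 0] ++ pre.drop i) ++ sub.drop (j+1) := by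
      rw [hpG, hinv, hcurv]
      exact pvIns_split pre (sub.drop j) i j (sub.getD j 0) (sub.drop (j+1)) (sub.getD j 0)
        hij hprelen hsub_j
    rw [hrange, hsub_j, List.foldl_cons, List.foldl_cons, hstepA, hstepB]
    exact ih (j+1) _ _ _ _ (by omega) hAlen hGinv
      (by simp only [List.length_append, List.length_take, List.length_drop, List.length_cons,
            List.length_nil]; omega)

-- ===== VERDICT (by name: the statement is the Claim_ definition above) =====
theorem gapInsertionSort_counting_spec : Claim_equal_gapInsertionSort_counting := by
  intro alist start gap _hdom hpre
  obtain ⟨hne, hposlow, hnegc⟩ := hpre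
  unfold Spec_gapInsertionSort_counting
  by_cases hg : 0 < gap
  · rw [portA_eq, portB_eq alist start gap hg]
    have hs0 : 0 ≤ start + gap := hposlow hg
    set r := PySem.Int.mod (start + gap) gap with hrdef
    have hr0 : 0 ≤ r := PySem.Int.mod_nonneg _ hg
    have hrg : r < gap := PySem.Int.mod_lt _ hg
    set q := PySem.Int.floordiv (start + gap) gap with hqdef
    have hsq : q * gap + r = start + gap := PySem.Int.floordiv_mul_add_mod _ _
    have hk0 : PySem.Int.floordiv (start + gap - r) gap = q := by
      have h1 : start + gap - r = q * gap := by linarith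
      rw [h1]
      refine (PySem.Int.floordiv_eq_iff_of_pos hg).mpr ⟨le_refl _, ?_⟩
      have e : (q+1) * gap = q * gap + gap := by ring
      linarith
    have hq0 : 0 ≤ q := by
      by_contra hqn
      push_neg at hqn
      have h1 : q ≤ -1 := by omega
      have h2 : q * gap ≤ (-1) * gap := mul_le_mul_of_nonneg_right h1 hg.le
      linarith
    rw [hk0]
    set L := pvL r (alist.length : Int) gap with hLdef
    have hL : ∀ k : Nat, k < L ↔ r + gap * (k:Int) < (alist.length : Int) :=
      fun k => pvL_iff r _ gap hg hr0 k
    have hgather : (PySem.List.slice? alist (some r) none gap).getD [] = pvG alist r gap L :=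
      slice_step_eq_pvG alist r gap hg hr0
    set sub := pvG alist r gap L with hsubdef
    have hsublen : sub.length = L := by rw [hsubdef, pvG_length]
    rw [hgather]
    set j0 := q.toNat with hj0def
    have hqj : ((j0:Nat):Int) = q := Int.toNat_of_nonneg hq0
    have hsj : start + gap = r + gap * ((j0:Nat):Int) := by
      rw [hqj]
      have e : gap * q = q * gap := mul_comm _ _
      linarith
    have hpreB : PySem.List.slice sub none (some q) = sub.take j0 := by
      rw [PySem.List.slice_to sub hq0, hj0def]
    have hrestB : PySem.List.slice sub (some q) none = sub.drop j0 := by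
      rw [PySem.List.slice_from sub hq0, hj0def]
    rw [hpreB, hrestB, hsj]
    by_cases hcase : j0 ≤ L
    · have houter := pvOuter_spec alist r gap hg hr0 hrg L sub hsubdef hL (L - j0) j0 alist
        (sub.take j0) 0 0 (by omega) rfl
        (by rw [← hsubdef]; exact (List.take_append_drop j0 sub).symm)
        (by rw [List.length_take]; omega)
      rw [houter]
    · push_neg at hcase
      have h1 : ¬ (r + gap * ((j0:Nat):Int) < (alist.length : Int)) :=
        fun hc => absurd ((hL j0).mpr hc) (by omega)
      rw [pyRange_pos_nil _ _ _ hg (not_lt.mp h1)]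
      rw [List.drop_eq_nil_of_le (by omega)]
      simp
  · have hglt : gap < 0 := by omega
    rw [portA_eq]
    rw [pyRange_neg_nil _ _ _ hglt (hnegc hglt)]
    unfold gapInsertionSort_counting_alt
    rw [if_neg hg]
    simp
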